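-- pv_equiv track=rewrite | github.com/cilt-uct/camera_dashboard_python | jobs/sync_agents.py | get_camera_url
-- ===== SOURCE A (Python) =====
-- def get_camera_url(items):
--     cam_url = ""
--
--     for item in items:
--         if item:
--             if "rtsp" in item["value"]:
--                 cam_url = item["value"]
--                 cam_url = cam_url.replace("rtspt", "rtsp")
--
--     return cam_url
-- ===== SOURCE B (Python) =====
-- def get_camera_url(items):
--     for item in reversed(list(items)):
--         if item and "rtsp" in item["value"]:
--             return item["value"].replace("rtspt", "rtsp")
--     return ""
-- ===== Notes on version B (the rewrite author's own statement) =====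
-- stated objective: alternative
-- what changed: B scans the items in reverse and returns the first (i.e. last overall) rtsp match immediately, instead of A's forward pass that keeps overwriting an accumulator.
import Mathlib
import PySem

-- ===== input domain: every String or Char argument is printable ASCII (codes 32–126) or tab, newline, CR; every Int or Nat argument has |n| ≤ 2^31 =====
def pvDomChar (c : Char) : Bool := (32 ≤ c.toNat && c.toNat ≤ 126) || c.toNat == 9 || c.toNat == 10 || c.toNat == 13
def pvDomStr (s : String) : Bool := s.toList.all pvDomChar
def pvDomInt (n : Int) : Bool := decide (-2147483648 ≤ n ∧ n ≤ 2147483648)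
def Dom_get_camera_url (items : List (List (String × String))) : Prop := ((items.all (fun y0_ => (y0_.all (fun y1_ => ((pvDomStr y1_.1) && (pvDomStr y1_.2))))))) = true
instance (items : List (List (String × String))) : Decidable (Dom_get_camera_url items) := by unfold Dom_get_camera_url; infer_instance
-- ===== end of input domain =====

-- B replaces A's forward accumulate-and-overwrite pass by a reverse scan with early return; return values only.

-- ===== PORT A =====
-- forward pass: keep overwriting cam_url each time a matching item is seen (loop body as a named step)
def stepA (cam_url : String) (item : List (String × String)) : String :=
  if item.isEmpty then cam_url
  else
    let v := (item.lookup "value").getD ""   -- item["value"]; Pre_ excludes the KeyError case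
    if PySem.Str.isIn "rtsp" v then PySem.Str.replace v "rtspt" "rtsp"
    else cam_url

def get_camera_url (items : List (List (String × String))) : String :=
  items.foldl stepA ""

-- ===== PORT B =====
-- reverse scan with early return (the `return` in Source B's loop)
def altScan : List (List (String × String)) → String
  | [] => ""
  | item :: rest =>
    if !item.isEmpty && PySem.Str.isIn "rtsp" ((item.lookup "value").getD "") then
      PySem.Str.replace ((item.lookup "value").getD "") "rtspt" "rtsp"
    else altScan rest

def get_camera_url_alt (items : List (List (String × String))) : String :=
  altScan items.reverse

-- ===== PRECONDITION & SPEC =====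
-- Pre_ excludes exactly the inputs where Python A raises KeyError: a non-empty item without a "value" key.
def Pre_get_camera_url (items : List (List (String × String))) : Prop :=
  ∀ item ∈ items, item ≠ [] → (item.lookup "value").isSome = true
instance (items : List (List (String × String))) : Decidable (Pre_get_camera_url items) := by
  unfold Pre_get_camera_url; infer_instance

def pvWitness_get_camera_url : (List (List (String × String))) :=
  [[("value", "rtspt://cam/1")], [], [("value", "none")]]

def Spec_get_camera_url (items : List (List (String × String))) (out : String) : Prop := out = get_camera_url_alt items
instance (items : List (List (String × String))) (out : String) : Decidable (Spec_get_camera_url items out) := by unfold Spec_get_camera_url; infer_instance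

-- ===== CLAIM (what is proved, stated in full; the proofs are below) =====
def Claim_equal_get_camera_url : Prop := ∀ (items : List (List (String × String))), Dom_get_camera_url items → Pre_get_camera_url items → Spec_get_camera_url items (get_camera_url items)

-- ===== LEMMAS AND PROOFS =====

theorem foldl_eq_altScan_reverse (l : List (List (String × String))) (c : String) :
    l.foldl stepA c = altScan l.reverse
    ∨ (altScan l.reverse = "" ∧ l.foldl stepA c = c) := by
  induction l using List.reverseRecOn generalizing c with
  | nil => exact Or.inr ⟨rfl, rfl⟩
  | append_singleton xs x ih =>
    rw [List.foldl_append, List.reverse_append]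
    simp only [List.reverse_singleton, List.singleton_append, List.foldl_cons, List.foldl_nil,
      altScan]
    by_cases hx : x.isEmpty = true
    · simp only [stepA, hx, Bool.not_true, Bool.false_and, if_true, Bool.false_eq_true, if_false]
      exact ih c
    · rw [Bool.not_eq_true] at hx
      by_cases hm : PySem.Str.isIn "rtsp" ((x.lookup "value").getD "") = true
      · left
        simp only [stepA, hx, hm, Bool.not_false, Bool.true_and, if_true, Bool.false_eq_true,
          if_false]
      · simp only [stepA, hx, hm, Bool.not_false, Bool.true_and, Bool.false_eq_true, if_false]
        exact ih c

-- ===== VERDICT (by name: the statement is the Claim_ definition above) =====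
theorem get_camera_url_spec : Claim_equal_get_camera_url := by
  intro items _ _
  unfold Spec_get_camera_url get_camera_url get_camera_url_alt
  rcases foldl_eq_altScan_reverse items "" with h | ⟨h1, h2⟩
  · exact h
  · rw [h1, h2]
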